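-- pv_equiv track=rewrite | github.com/isk02206/python | informatics/previous informatics/Infomatics-1/7/long_count.py | dmy
-- ===== SOURCE A (Python) =====
-- def dmy(dark):
--
--     division = ''
--     list1 = []
--
--
--     for char in dark:
--
--         if char.isdigit():
--
--             division += char
--
--         else:
--             #/,-,+
--             list1.append(int(division))
--             division = ''
--
--     if division:
--         #division이 채워져 잇을떄
--         list1.append(int(division))
--
--     return tuple(list1)
-- ===== SOURCE B (Python) =====
-- def dmy(dark):
--     out = []
--     rest = dark
--     while rest:
--         i = 0
--         while i < len(rest) and rest[i].isdigit():
--             i += 1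
--         if i == len(rest):
--             out.append(int(rest))
--             rest = ''
--         else:
--             out.append(int(rest[:i]))
--             rest = rest[i + 1:]
--     return tuple(out)
-- ===== Notes on version B (the rewrite author's own statement) =====
-- stated objective: alternative
-- what changed: B replaces A's char-by-char loop with a mutable accumulator string and end-of-loop flush by an outer loop that peels one whole digit run (plus its separator) off the front of the remaining string with slices each iteration.
import Mathlib
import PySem

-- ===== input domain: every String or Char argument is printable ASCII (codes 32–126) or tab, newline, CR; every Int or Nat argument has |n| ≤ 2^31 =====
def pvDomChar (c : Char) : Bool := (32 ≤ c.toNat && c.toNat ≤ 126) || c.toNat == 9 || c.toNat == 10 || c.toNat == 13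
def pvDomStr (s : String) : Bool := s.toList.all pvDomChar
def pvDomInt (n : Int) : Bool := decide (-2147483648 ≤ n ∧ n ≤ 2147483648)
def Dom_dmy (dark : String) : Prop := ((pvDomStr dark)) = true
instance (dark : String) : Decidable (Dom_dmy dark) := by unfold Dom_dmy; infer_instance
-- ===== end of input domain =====

-- B peels one whole digit run (and its separator) off the front of the remaining string per
-- outer-loop step, instead of A's char-by-char loop with an accumulator string and final flush
-- (objective: alternative; same O(n) cost).


-- int(cs): Pre_dmy excludes the inputs on which Python reaches int('') (ValueError), so the
-- .getD 0 default is never the claimed value on an admitted input.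
def pvInt (cs : List Char) : Int := (PySem.Int.ofChars? cs).getD 0

-- ===== PORT A =====
-- the for-loop over the characters, state = (division, list1)
def dmyGo : List Char → List Char → List Int → List Int
  | [], division, list1 =>
      if division.isEmpty then list1 else list1 ++ [pvInt division]
  | c :: rest, division, list1 =>
      if PySem.Chars.isdigit c then dmyGo rest (division ++ [c]) list1
      else dmyGo rest [] (list1 ++ [pvInt division])

def dmy (dark : String) : List Int := dmyGo dark.toList [] []

-- ===== PORT B =====
-- outer while loop: split the remaining chars into the leading digit run and the rest;
-- if no separator follows, flush the run and stop, else drop the separator and recurse.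
def dmyAltGo : List Char → List Int
  | [] => []
  | c :: cs =>
      let run := (c :: cs).takeWhile PySem.Chars.isdigit
      match _h : (c :: cs).dropWhile PySem.Chars.isdigit with
      | [] => [pvInt run]
      | _ :: tail => pvInt run :: dmyAltGo tail
termination_by l => l.length
decreasing_by
  have hle := List.length_dropWhile_le (p := PySem.Chars.isdigit) (l := c :: cs)
  rw [_h] at hle
  simp at hle ⊢
  omega

def dmy_alt (dark : String) : List Int := dmyAltGo dark.toList

-- ===== PRECONDITION & SPEC =====
-- Pre_ excludes exactly the inputs on which the Python A raises ValueError — a call of int on an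
-- empty digit run, i.e. a non-digit character at position 0 or right after another
-- non-digit; B raises there too.
def Pre_dmy (dark : String) : Prop :=
  (dark.toList.head?.all PySem.Chars.isdigit = true) ∧
  (∀ p ∈ dark.toList.zip dark.toList.tail,
    PySem.Chars.isdigit p.2 = false → PySem.Chars.isdigit p.1 = true)
instance (dark : String) : Decidable (Pre_dmy dark) := by unfold Pre_dmy; infer_instance

def pvWitness_dmy : String := "12+34/5 "

def Spec_dmy (dark : String) (out : List Int) : Prop := out = dmy_alt dark
instance (dark : String) (out : List Int) : Decidable (Spec_dmy dark out) := by unfold Spec_dmy; infer_instance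

-- ===== CLAIM (what is proved, stated in full; the proofs are below) =====
def Claim_equal_dmy : Prop := ∀ (dark : String), Dom_dmy dark → Pre_dmy dark → Spec_dmy dark (dmy dark)

-- ===== LEMMAS AND PROOFS =====

theorem takeWhile_append_digits (div rest : List Char)
    (h : ∀ c ∈ div, PySem.Chars.isdigit c = true) :
    (div ++ rest).takeWhile PySem.Chars.isdigit = div ++ rest.takeWhile PySem.Chars.isdigit := by
  induction div with
  | nil => simp
  | cons d ds ih =>
      simp [h d (by simp)]
      exact ih (fun c hc => h c (by simp [hc]))

theorem dropWhile_append_digits (div rest : List Char)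
    (h : ∀ c ∈ div, PySem.Chars.isdigit c = true) :
    (div ++ rest).dropWhile PySem.Chars.isdigit = rest.dropWhile PySem.Chars.isdigit := by
  induction div with
  | nil => simp
  | cons d ds ih =>
      simp [h d (by simp)]
      exact ih (fun c hc => h c (by simp [hc]))

theorem dmyAltGo_flush (div : List Char) (hne : div ≠ [])
    (h : ∀ c ∈ div, PySem.Chars.isdigit c = true) :
    dmyAltGo div = [pvInt div] := by
  cases div with
  | nil => exact absurd rfl hne
  | cons d ds =>
      rw [dmyAltGo]
      have ht : (d :: ds).takeWhile PySem.Chars.isdigit = d :: ds := by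
        have := takeWhile_append_digits (d :: ds) [] h
        simpa using this
      have hd : (d :: ds).dropWhile PySem.Chars.isdigit = [] := by
        have := dropWhile_append_digits (d :: ds) [] h
        simpa using this
      rw [ht]
      split
      · rfl
      · rename_i heq
        rw [hd] at heq
        cases heq

theorem dmyAltGo_sep (div : List Char) (c : Char) (rest : List Char)
    (h : ∀ x ∈ div, PySem.Chars.isdigit x = true)
    (hc : PySem.Chars.isdigit c = false) :
    dmyAltGo (div ++ c :: rest) = pvInt div :: dmyAltGo rest := by
  have ht : (div ++ c :: rest).takeWhile PySem.Chars.isdigit = div := by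
    rw [takeWhile_append_digits div _ h]
    simp [List.takeWhile, hc]
  have hd : (div ++ c :: rest).dropWhile PySem.Chars.isdigit = c :: rest := by
    rw [dropWhile_append_digits div _ h]
    simp [List.dropWhile, hc]
  cases hdiv : div ++ c :: rest with
  | nil => simp at hdiv
  | cons a as =>
      rw [dmyAltGo]
      rw [← hdiv, ht, hd]

theorem dmyGo_eq (cs : List Char) : ∀ (div : List Char) (acc : List Int),
    (∀ c ∈ div, PySem.Chars.isdigit c = true) →
    dmyGo cs div acc = acc ++ dmyAltGo (div ++ cs) := by
  induction cs with
  | nil =>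
      intro div acc h
      by_cases hdiv : div = []
      · subst hdiv; simp [dmyGo, dmyAltGo]
      · simp [dmyGo, List.isEmpty_iff, hdiv, dmyAltGo_flush div hdiv h]
  | cons c rest ih =>
      intro div acc h
      by_cases hc : PySem.Chars.isdigit c = true
      · rw [dmyGo]
        simp only [hc, if_true]
        rw [ih (div ++ [c]) acc (by intro x hx; rcases List.mem_append.1 hx with h1 | h1
                                    · exact h x h1
                                    · simp at h1; subst h1; exact hc)]
        simp
      · rw [dmyGo]
        simp only [hc]
        rw [ih [] (acc ++ [pvInt div]) (by intro x hx; simp at hx)]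
        rw [dmyAltGo_sep div c rest h (by simpa using hc)]
        simp

-- ===== VERDICT (by name: the statement is the Claim_ definition above) =====
theorem dmy_spec : Claim_equal_dmy := by
  intro dark _ _
  unfold Spec_dmy dmy dmy_alt
  simpa using dmyGo_eq dark.toList [] [] (by intro c hc; simp at hc)
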